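-- pv_equiv track=rewrite | github.com/SimonOuellette35/ARC_gym | ARC_gym/grid_sampling/object_grid_generation.py | _enumerate_dims_for_size
-- ===== SOURCE A (Python) =====
-- def _enumerate_dims_for_size(target_size, max_h, max_w):
--     """Yield (shape_type, h, w) such that pixel count equals target_size and fits in max_h, max_w."""
--     for shape_type in ('filled_rect', 'empty_rect'):
--         if shape_type == 'filled_rect':
--             for h in range(3, min(target_size // 3, max_h) + 1):
--                 if target_size % h == 0:
--                     w = target_size // h
--                     if 3 <= w <= max_w:
--                         yield shape_type, h, w
--         else:
--             half = (target_size + 4) // 2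
--             if half < 6:
--                 continue
--             for h in range(3, min(half - 2, max_h) + 1):
--                 w = half - h
--                 if 3 <= w <= max_w:
--                     yield shape_type, h, w
-- ===== SOURCE B (Python) =====
-- def _enumerate_dims_for_size(target_size, max_h, max_w):
--     """Yield (shape_type, h, w) such that pixel count equals target_size and fits in max_h, max_w."""
--     divisors = set()
--     d = 1
--     while d * d <= target_size:
--         if target_size % d == 0:
--             divisors.add(d)
--             divisors.add(target_size // d)
--         d += 1
--     for h in sorted(divisors):
--         if 3 <= h <= max_h:
--             w = target_size // h
--             if 3 <= w <= max_w:
--                 yield 'filled_rect', h, w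
--     half = (target_size + 4) // 2
--     if half >= 6:
--         for h in range(max(3, half - max_w), min(half - 3, max_h) + 1):
--             yield 'empty_rect', h, half - h
-- ===== Notes on version B (the rewrite author's own statement) =====
-- stated objective: alternative
-- what changed: The filled_rect branch no longer scans every height from 3 to target_size//3: B enumerates divisor pairs (d, target_size//d) for d up to sqrt(target_size) into a set and walks them in sorted order, and the empty_rect branch emits a closed-form index range instead of filtering the full range; overall cost is dominated by the output size, so B is not measurably faster.
import Mathlib
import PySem

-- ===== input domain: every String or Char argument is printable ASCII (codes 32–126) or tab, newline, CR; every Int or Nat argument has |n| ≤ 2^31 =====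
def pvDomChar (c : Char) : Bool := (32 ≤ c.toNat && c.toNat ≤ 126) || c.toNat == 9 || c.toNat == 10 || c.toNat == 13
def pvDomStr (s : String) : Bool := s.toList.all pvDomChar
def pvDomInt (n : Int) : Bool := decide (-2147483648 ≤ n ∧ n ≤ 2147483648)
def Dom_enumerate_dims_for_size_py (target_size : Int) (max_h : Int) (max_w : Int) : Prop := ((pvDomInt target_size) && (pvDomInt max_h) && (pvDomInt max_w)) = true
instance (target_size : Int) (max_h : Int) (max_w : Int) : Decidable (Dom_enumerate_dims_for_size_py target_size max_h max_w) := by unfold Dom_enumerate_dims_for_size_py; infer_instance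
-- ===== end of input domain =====

-- B finds filled_rect heights by divisor-pair enumeration over a set instead of A's linear
-- scan of all candidate heights, and emits the empty_rect heights as a closed-form index
-- range instead of filtering the full range; same return value everywhere.

-- ===== PORT A =====
def enumerate_dims_for_size_py (target_size : Int) (max_h : Int) (max_w : Int) : List (String × Int × Int) :=
  -- 'filled_rect' pass: for h in range(3, min(target_size // 3, max_h) + 1)
  let filled :=
    (PySem.List.pyRange 3 (min (PySem.Int.floordiv target_size 3) max_h + 1) 1).foldl
      (fun acc h =>
        if PySem.Int.mod target_size h = 0 then
          let w := PySem.Int.floordiv target_size h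
          if 3 ≤ w ∧ w ≤ max_w then acc ++ [("filled_rect", h, w)] else acc
        else acc) []
  -- 'empty_rect' pass
  let half := PySem.Int.floordiv (target_size + 4) 2
  let empty :=
    if half < 6 then []
    else
      (PySem.List.pyRange 3 (min (half - 2) max_h + 1) 1).foldl
        (fun acc h =>
          let w := half - h
          if 3 ≤ w ∧ w ≤ max_w then acc ++ [("empty_rect", h, w)] else acc) []
  filled ++ empty

-- ===== PORT B =====
-- the while-loop 'd = 1; while d*d <= target_size: …; d += 1' collecting divisor pairs into a set
def pvDivLoop (target_size : Int) (d : Int) (s : PySem.Set Int) : PySem.Set Int :=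
  if h : d * d ≤ target_size then
    pvDivLoop target_size (d + 1)
      (if PySem.Int.mod target_size d = 0 then
        PySem.Set.add (PySem.Set.add s d) (PySem.Int.floordiv target_size d)
      else s)
  else s
termination_by (target_size + 1 - d).toNat
decreasing_by
  have hdd : d ≤ d * d := by nlinarith
  omega

def enumerate_dims_for_size_py_alt (target_size : Int) (max_h : Int) (max_w : Int) : List (String × Int × Int) :=
  let divisors := pvDivLoop target_size 1 PySem.Set.empty
  let filled :=
    (PySem.List.sorted divisors (fun x => x) false).foldl
      (fun acc h =>
        if 3 ≤ h ∧ h ≤ max_h then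
          let w := PySem.Int.floordiv target_size h
          if 3 ≤ w ∧ w ≤ max_w then acc ++ [("filled_rect", h, w)] else acc
        else acc) []
  let half := PySem.Int.floordiv (target_size + 4) 2
  let empty :=
    if 6 ≤ half then
      (PySem.List.pyRange (max 3 (half - max_w)) (min (half - 3) max_h + 1) 1).map
        (fun h => ("empty_rect", h, half - h))
    else []
  filled ++ empty

-- ===== PRECONDITION & SPEC =====
def Spec_enumerate_dims_for_size_py (target_size : Int) (max_h : Int) (max_w : Int) (out : List (String × Int × Int)) : Prop := out = enumerate_dims_for_size_py_alt target_size max_h max_w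
instance (target_size : Int) (max_h : Int) (max_w : Int) (out : List (String × Int × Int)) : Decidable (Spec_enumerate_dims_for_size_py target_size max_h max_w out) := by unfold Spec_enumerate_dims_for_size_py; infer_instance

-- ===== CLAIM (what is proved, stated in full; the proofs are below) =====
def Claim_equal_enumerate_dims_for_size_py : Prop := ∀ (target_size : Int) (max_h : Int) (max_w : Int), Dom_enumerate_dims_for_size_py target_size max_h max_w → Spec_enumerate_dims_for_size_py target_size max_h max_w (enumerate_dims_for_size_py target_size max_h max_w)

-- ===== LEMMAS AND PROOFS =====

-- 'if c1: if c2: out.append(f h)' folded over a list is a filter-then-map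
theorem pv_foldl_if2 {α : Type} (c1 c2 : Int → Prop) [DecidablePred c1] [DecidablePred c2]
    (f : Int → α) (l : List Int) :
    ∀ (acc : List α),
      l.foldl (fun acc h => if c1 h then (if c2 h then acc ++ [f h] else acc) else acc) acc
        = acc ++ (l.filter (fun h => decide (c1 h) && decide (c2 h))).map f := by
  induction l with
  | nil => intro acc; simp
  | cons a t ih =>
    intro acc
    by_cases h1 : c1 a <;> by_cases h2 : c2 a <;>
      simp [List.foldl_cons, h1, h2, ih]

theorem pv_foldl_if1 {α : Type} (c : Int → Prop) [DecidablePred c]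
    (f : Int → α) (l : List Int) :
    ∀ (acc : List α),
      l.foldl (fun acc h => if c h then acc ++ [f h] else acc) acc
        = acc ++ (l.filter (fun h => decide (c h))).map f := by
  induction l with
  | nil => intro acc; simp
  | cons a t ih =>
    intro acc
    by_cases h1 : c a <;> simp [List.foldl_cons, h1, ih]

-- two strictly increasing integer lists with the same members are equal
theorem pv_eq_of_pairwise_lt_of_mem_iff :
    ∀ (l1 l2 : List Int), l1.Pairwise (· < ·) → l2.Pairwise (· < ·) →
      (∀ x, x ∈ l1 ↔ x ∈ l2) → l1 = l2 := by
  intro l1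
  induction l1 with
  | nil =>
    intro l2 _ _ hm
    cases l2 with
    | nil => rfl
    | cons b t2 => exact absurd ((hm b).mpr (by simp)) (by simp)
  | cons a t1 ih =>
    intro l2 h1 h2 hm
    cases l2 with
    | nil => exact absurd ((hm a).mp (by simp)) (by simp)
    | cons b t2 =>
      have ha2 := List.mem_cons.mp ((hm a).mp (List.mem_cons_self))
      have hb1 := List.mem_cons.mp ((hm b).mpr (List.mem_cons_self))
      have hab : a = b := by
        rcases ha2 with hx | hx
        · exact hx
        · rcases hb1 with hy | hy
          · exact hy.symm
          · have c1 := (List.pairwise_cons.mp h1).1 b hy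
            have c2 := (List.pairwise_cons.mp h2).1 a hx
            omega
      subst hab
      have ht : t1 = t2 := by
        apply ih t2 (List.pairwise_cons.mp h1).2 (List.pairwise_cons.mp h2).2
        intro x
        constructor
        · intro hx
          have hax : a < x := (List.pairwise_cons.mp h1).1 x hx
          rcases List.mem_cons.mp ((hm x).mp (List.mem_cons_of_mem a hx)) with hy | hy
          · omega
          · exact hy
        · intro hx
          have hax : a < x := (List.pairwise_cons.mp h2).1 x hx
          rcases List.mem_cons.mp ((hm x).mpr (List.mem_cons_of_mem a hx)) with hy | hy
          · omega
          · exact hy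
      rw [ht]

-- membership in the divisor-collecting loop
theorem pv_mem_pvDivLoop (ts : Int) : ∀ (d : Int) (s : PySem.Set Int), 1 ≤ d →
    ∀ x, x ∈ pvDivLoop ts d s ↔
      x ∈ s ∨ ∃ e, d ≤ e ∧ e * e ≤ ts ∧ PySem.Int.mod ts e = 0 ∧
        (x = e ∨ x = PySem.Int.floordiv ts e) := by
  intro d s hd x
  induction d, s using pvDivLoop.induct ts with
  | case1 d s hlt ih =>
    rw [pvDivLoop, dif_pos hlt]
    simp only [dite_eq_ite] at ih ⊢
    rw [ih (by omega)]
    by_cases hm : PySem.Int.mod ts d = 0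
    · simp only [if_pos hm, PySem.Set.mem_add]
      constructor
      · rintro (((hs | hs) | hs) | ⟨e, he1, he2, he3, he4⟩)
        · exact Or.inl hs
        · exact Or.inr ⟨d, le_refl d, hlt, hm, Or.inl hs⟩
        · exact Or.inr ⟨d, le_refl d, hlt, hm, Or.inr hs⟩
        · exact Or.inr ⟨e, by omega, he2, he3, he4⟩
      · rintro (hs | ⟨e, he1, he2, he3, he4⟩)
        · exact Or.inl (Or.inl (Or.inl hs))
        · by_cases hed : e = d
          · subst hed
            rcases he4 with hy | hy
            · exact Or.inl (Or.inl (Or.inr hy))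
            · exact Or.inl (Or.inr hy)
          · exact Or.inr ⟨e, by omega, he2, he3, he4⟩
    · simp only [if_neg hm]
      constructor
      · rintro (hs | ⟨e, he1, he2, he3, he4⟩)
        · exact Or.inl hs
        · exact Or.inr ⟨e, by omega, he2, he3, he4⟩
      · rintro (hs | ⟨e, he1, he2, he3, he4⟩)
        · exact Or.inl hs
        · by_cases hed : e = d
          · subst hed; exact absurd he3 hm
          · exact Or.inr ⟨e, by omega, he2, he3, he4⟩
  | case2 d s hlt =>
    rw [pvDivLoop, dif_neg hlt]
    constructor
    · exact Or.inl
    · rintro (hs | ⟨e, he1, he2, he3, he4⟩)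
      · exact hs
      · exfalso
        have : d * d ≤ e * e := by nlinarith
        exact hlt (by omega)

theorem pv_nodup_pvDivLoop (ts : Int) : ∀ (d : Int) (s : PySem.Set Int),
    s.Nodup → (pvDivLoop ts d s).Nodup := by
  intro d s hs
  induction d, s using pvDivLoop.induct ts with
  | case1 d s hlt ih =>
    rw [pvDivLoop, dif_pos hlt]
    simp only [dite_eq_ite] at ih
    apply ih
    by_cases hm : PySem.Int.mod ts d = 0
    · simp only [if_pos hm]
      exact PySem.Set.nodup_add _ _ (PySem.Set.nodup_add _ _ hs)
    · simpa [hm] using hs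
  | case2 d s hlt =>
    rw [pvDivLoop, dif_neg hlt]
    exact hs

-- arithmetic core: filtered divisor-set membership coincides with A's range condition
theorem pv_divChar (ts mh mw x : Int) :
    ((∃ e, 1 ≤ e ∧ e * e ≤ ts ∧ PySem.Int.mod ts e = 0 ∧
        (x = e ∨ x = PySem.Int.floordiv ts e)) ∧
      (3 ≤ x ∧ x ≤ mh) ∧
      (3 ≤ PySem.Int.floordiv ts x ∧ PySem.Int.floordiv ts x ≤ mw))
    ↔ ((3 ≤ x ∧ x < min (PySem.Int.floordiv ts 3) mh + 1) ∧
       PySem.Int.mod ts x = 0 ∧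
       (3 ≤ PySem.Int.floordiv ts x ∧ PySem.Int.floordiv ts x ≤ mw)) := by
  constructor
  · rintro ⟨⟨e, he1, he2, he3, he4⟩, ⟨hx3, hxmh⟩, hw3, hwmw⟩
    have hx0 : (0:Int) < x := by omega
    have hmod : PySem.Int.mod ts x = 0 := by
      rcases he4 with rfl | rfl
      · exact he3
      · have he0 : (0:Int) < e := by omega
        have hts : PySem.Int.floordiv ts e * e + PySem.Int.mod ts e = ts :=
          PySem.Int.floordiv_mul_add_mod ts e
        refine (PySem.Int.mod_eq_zero_iff_dvd ts _).mpr ⟨e, ?_⟩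
        omega
    have htseq : PySem.Int.floordiv ts x * x + PySem.Int.mod ts x = ts :=
      PySem.Int.floordiv_mul_add_mod ts x
    have hts3x : x * 3 ≤ ts := by nlinarith
    have hfd3 : x ≤ PySem.Int.floordiv ts 3 :=
      (PySem.Int.le_floordiv_iff_mul_le (by omega)).mpr hts3x
    exact ⟨⟨hx3, by omega⟩, hmod, hw3, hwmw⟩
  · rintro ⟨⟨hx3, hlt⟩, hmod, hw3, hwmw⟩
    have hx0 : (0:Int) < x := by omega
    have hxmh : x ≤ mh := by omega
    have htseq : PySem.Int.floordiv ts x * x + PySem.Int.mod ts x = ts :=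
      PySem.Int.floordiv_mul_add_mod ts x
    refine ⟨?_, ⟨hx3, hxmh⟩, hw3, hwmw⟩
    by_cases hxx : x * x ≤ ts
    · exact ⟨x, by omega, hxx, hmod, Or.inl rfl⟩
    · refine ⟨PySem.Int.floordiv ts x, by omega, ?_, ?_, Or.inr ?_⟩
      · nlinarith
      · refine (PySem.Int.mod_eq_zero_iff_dvd ts _).mpr ⟨x, ?_⟩
        omega
      · have hw0 : (0:Int) < PySem.Int.floordiv ts x := by omega
        symm
        refine (PySem.Int.floordiv_eq_iff_of_pos hw0).mpr ⟨?_, ?_⟩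
        · nlinarith
        · nlinarith

-- the filtered height lists of the two filled_rect passes coincide
theorem pv_filled_filter_eq (ts mh mw : Int) :
    ((PySem.List.pyRange 3 (min (PySem.Int.floordiv ts 3) mh + 1) 1).filter
        (fun h => decide (PySem.Int.mod ts h = 0) &&
          decide (3 ≤ PySem.Int.floordiv ts h ∧ PySem.Int.floordiv ts h ≤ mw)))
    = ((PySem.List.sorted (pvDivLoop ts 1 PySem.Set.empty) (fun x => x) false).filter
        (fun h => decide (3 ≤ h ∧ h ≤ mh) &&
          decide (3 ≤ PySem.Int.floordiv ts h ∧ PySem.Int.floordiv ts h ≤ mw))) := by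
  apply pv_eq_of_pairwise_lt_of_mem_iff
  · exact (PySem.List.pairwise_lt_pyRange_one _ _).filter _
  · have hnd : (pvDivLoop ts 1 PySem.Set.empty).Nodup :=
      pv_nodup_pvDivLoop ts 1 _ List.nodup_nil
    have hnd2 : (PySem.List.sorted (pvDivLoop ts 1 PySem.Set.empty) (fun x => x) false).Nodup :=
      (PySem.List.sorted_perm _ _ _).nodup_iff.mpr hnd
    have hle := PySem.List.sorted_pairwise (pvDivLoop ts 1 PySem.Set.empty) (fun x => x)
    exact ((hle.and hnd2).imp (fun hp => lt_of_le_of_ne hp.1 hp.2)).filter _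
  · intro x
    have hchar := pv_divChar ts mh mw x
    have hmem := pv_mem_pvDivLoop ts 1 PySem.Set.empty (le_refl 1) x
    simp only [List.mem_filter, Bool.and_eq_true, decide_eq_true_eq,
      PySem.List.mem_sorted, PySem.List.mem_pyRange_one, hmem] at *
    have hempty : ¬ x ∈ PySem.Set.empty := by simp [PySem.Set.empty]
    constructor
    · rintro ⟨⟨hx1, hx2⟩, hm, hw⟩
      have h2 := hchar.mpr ⟨⟨hx1, hx2⟩, hm, hw⟩
      exact ⟨Or.inr h2.1, h2.2⟩
    · rintro ⟨hmem', hxh, hw⟩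
      have hoe : ∃ e, 1 ≤ e ∧ e * e ≤ ts ∧ PySem.Int.mod ts e = 0 ∧
          (x = e ∨ x = PySem.Int.floordiv ts e) := hmem'.resolve_left hempty
      exact hchar.mp ⟨hoe, hxh, hw⟩

-- the filtered empty_rect height range is the closed-form range
theorem pv_empty_filter_eq (half mh mw : Int) :
    ((PySem.List.pyRange 3 (min (half - 2) mh + 1) 1).filter
        (fun h => decide (3 ≤ half - h ∧ half - h ≤ mw)))
    = PySem.List.pyRange (max 3 (half - mw)) (min (half - 3) mh + 1) 1 := by
  apply pv_eq_of_pairwise_lt_of_mem_iff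
  · exact (PySem.List.pairwise_lt_pyRange_one _ _).filter _
  · exact PySem.List.pairwise_lt_pyRange_one _ _
  · intro x
    simp only [List.mem_filter, decide_eq_true_eq, PySem.List.mem_pyRange_one]
    omega

-- ===== VERDICT (by name: the statement is the Claim_ definition above) =====
theorem enumerate_dims_for_size_py_spec : Claim_equal_enumerate_dims_for_size_py := by
  intro ts mh mw _
  unfold Spec_enumerate_dims_for_size_py
  simp only [enumerate_dims_for_size_py, enumerate_dims_for_size_py_alt]
  rw [pv_foldl_if2 (fun h => PySem.Int.mod ts h = 0)
        (fun h => 3 ≤ PySem.Int.floordiv ts h ∧ PySem.Int.floordiv ts h ≤ mw)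
        (fun h => ("filled_rect", h, PySem.Int.floordiv ts h)),
      pv_foldl_if2 (fun h => 3 ≤ h ∧ h ≤ mh)
        (fun h => 3 ≤ PySem.Int.floordiv ts h ∧ PySem.Int.floordiv ts h ≤ mw)
        (fun h => ("filled_rect", h, PySem.Int.floordiv ts h))]
  rw [pv_filled_filter_eq ts mh mw]
  congr 1
  by_cases hh : PySem.Int.floordiv (ts + 4) 2 < 6
  · rw [if_pos hh, if_neg (show ¬ (6 ≤ PySem.Int.floordiv (ts + 4) 2) by omega)]
  · simp only [if_neg hh, if_pos (show 6 ≤ PySem.Int.floordiv (ts + 4) 2 by omega)]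
    rw [pv_foldl_if1
        (fun h => 3 ≤ PySem.Int.floordiv (ts + 4) 2 - h ∧ PySem.Int.floordiv (ts + 4) 2 - h ≤ mw)
        (fun h => ("empty_rect", h, PySem.Int.floordiv (ts + 4) 2 - h))]
    rw [pv_empty_filter_eq (PySem.Int.floordiv (ts + 4) 2) mh mw]
    simp
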